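-- pv_equiv track=rewrite | github.com/rlagusgh0223/Algorithm | 240303/프로그래머스, 외톨이 알파벳.py | solution
-- ===== SOURCE A (Python) =====
-- from collections import defaultdict
--
-- def solution(input_string):
--     check = defaultdict(int)
--     # 첫 글자는 무조건 새로운 글자 이므로 1 추가한다
--     check[input_string[0]] += 1
--     # 두번째 글자부터 앞의 글자와 비교하여 다른 글자일 경우 1 추가한다
--     # 앞의 글자와 다르다면 새로운 글자 덩어리가 시작된거다
--     # 이 덩어리의 수가 2 이상이면 외톨이 알파벳이다
--     for i in range(1, len(input_string)):
--         if input_string[i-1] != input_string[i]: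
--             check[input_string[i]] += 1
--     answer = [x for x, y in check.items() if y > 1]
--     if len(answer) == 0:
--         answer = 'N'
--     else:
--         answer = ''.join(sorted(answer))
--     return answer
-- ===== SOURCE B (Python) =====
-- def solution(input_string):
--     # A letter is "lonely" iff its occurrences are not one contiguous block:
--     # some different character lies strictly between its first and last occurrence.
--     s = input_string
--     lonely = []
--     for c in sorted(set(s)):
--         i = s.index(c)
--         j = len(s) - 1 - s[::-1].index(c)
--         if any(s[k] != c for k in range(i, j)):
--             lonely.append(c)
--     return ''.join(lonely) if lonely else 'N'
-- ===== Notes on version B (the rewrite author's own statement) =====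
-- stated objective: alternative
-- what changed: Instead of scanning adjacent index pairs and counting run starts per letter in a dict, B declares a letter lonely iff a different character occurs strictly between its first and last occurrence, found with str.index/rindex and one any() scan per distinct letter.
-- outside the precondition, e.g. on solution(''): A raises IndexError, B returns 'N'
import Mathlib
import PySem

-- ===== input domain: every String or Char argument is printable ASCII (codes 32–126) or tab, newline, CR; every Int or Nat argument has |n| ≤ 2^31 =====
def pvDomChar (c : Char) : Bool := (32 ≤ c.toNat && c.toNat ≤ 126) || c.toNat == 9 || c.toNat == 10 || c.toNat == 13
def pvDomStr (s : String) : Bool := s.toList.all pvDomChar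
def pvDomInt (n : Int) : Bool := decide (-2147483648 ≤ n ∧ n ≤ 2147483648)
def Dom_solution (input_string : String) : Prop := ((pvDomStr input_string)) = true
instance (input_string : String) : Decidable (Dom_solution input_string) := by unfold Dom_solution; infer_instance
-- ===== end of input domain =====

-- B finds each letter's first and last occurrence and checks for a foreign character
-- strictly between them (no counting of runs as in A); alternative algorithm, similar cost.

-- ===== PORT A =====
-- literal transliteration: defaultdict counting run starts while scanning indices,
-- then filter counts > 1, sort and join.  input_string[0] raises IndexError on the
-- empty string: excluded by Pre_solution (pyGetD's default is never reached inside Pre_).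
def solution (input_string : String) : String :=
  let l := input_string.toList
  let check : PySem.Dict Char Int :=
    PySem.Dict.modify PySem.Dict.empty (PySem.List.pyGetD l 0 ' ') 0 (· + 1)
  let check := (PySem.List.pyRange 1 (l.length : Int)).foldl
    (fun d i =>
      if PySem.List.pyGetD l (i - 1) ' ' ≠ PySem.List.pyGetD l i ' ' then
        PySem.Dict.modify d (PySem.List.pyGetD l i ' ') 0 (· + 1)
      else d) check
  let answer := (check.items.filter (fun p => p.2 > 1)).map Prod.fst
  if answer.length = 0 then "N"
  else String.ofList (PySem.List.sorted answer (fun x => x) false)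

-- ===== PORT B =====
-- literal transliteration of Source B: for c in sorted(set(s)): i = s.index(c);
-- j = len(s) - 1 - s[::-1].index(c); keep c if any(s[k] != c for k in range(i, j)).
-- index? is always `some` for c ∈ set(s); getD 0 is never the fallback.
def solution_alt (input_string : String) : String :=
  let l := input_string.toList
  let lonely := (PySem.List.sorted (PySem.Set.ofList l) (fun x => x) false).filter
    (fun c =>
      let i : Int := ((PySem.List.index? l c).getD 0 : Nat)
      let rev := (PySem.List.slice? l none none (-1)).getD []
      let j : Int := (l.length : Int) - 1 - ((PySem.List.index? rev c).getD 0 : Nat)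
      (PySem.List.pyRange i j).any (fun k => decide (PySem.List.pyGetD l k ' ' ≠ c)))
  if lonely = [] then "N" else String.ofList lonely

-- ===== PRECONDITION & SPEC =====
-- Pre_ excludes only the empty string, on which A's input_string[0] raises IndexError.
def Pre_solution (input_string : String) : Prop := input_string ≠ ""
instance (input_string : String) : Decidable (Pre_solution input_string) := by unfold Pre_solution; infer_instance
def pvWitness_solution : String := "aabca"
def Spec_solution (input_string : String) (out : String) : Prop := out = solution_alt input_string
instance (input_string : String) (out : String) : Decidable (Spec_solution input_string out) := by unfold Spec_solution; infer_instance

-- ===== CLAIM (what is proved, stated in full; the proofs are below) =====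
def Claim_equal_solution : Prop := ∀ (input_string : String), Dom_solution input_string → Pre_solution input_string → Spec_solution input_string (solution input_string)
-- ===== LEMMAS AND PROOFS =====

-- run-start heads of l, via the same indices A's loop visits
def pvHeads (l : List Char) : List Char :=
  PySem.List.pyGetD l 0 ' ' ::
    ((PySem.List.pyRange 1 (l.length : Int)).filter
        (fun i => decide (PySem.List.pyGetD l (i - 1) ' ' ≠ PySem.List.pyGetD l i ' '))).map
      (fun i => PySem.List.pyGetD l i ' ')

-- Nat-world run-start predicate and run count
def pvRS (l : List Char) (c : Char) (i : Nat) : Bool :=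
  decide (l.getD i ' ' = c ∧ (i = 0 ∨ l.getD (i - 1) ' ' ≠ c))
def pvNRuns (l : List Char) (c : Char) : Nat := (List.range l.length).countP (pvRS l c)

-- first / last index helpers (as the B port computes them)
def pvFi (l : List Char) (c : Char) : Nat := (List.idxOf? c l).getD 0
def pvLi (l : List Char) (c : Char) : Nat := l.length - 1 - (List.idxOf? c l.reverse).getD 0

lemma pv_dictA (l : List Char) :
    (PySem.List.pyRange 1 (l.length : Int)).foldl
      (fun d i =>
        if PySem.List.pyGetD l (i - 1) ' ' ≠ PySem.List.pyGetD l i ' ' then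
          PySem.Dict.modify d (PySem.List.pyGetD l i ' ') 0 (· + 1)
        else d)
      (PySem.Dict.modify PySem.Dict.empty (PySem.List.pyGetD l 0 ' ') 0 (· + 1))
    = PySem.Dict.counter (pvHeads l) := by
  rw [PySem.Dict.counter_eq_foldl, pvHeads, List.foldl_cons, List.foldl_map,
    PySem.List.foldl_ite_eq_foldl_filter
      (p := fun i => PySem.List.pyGetD l (i - 1) ' ' ≠ PySem.List.pyGetD l i ' ')
      (f := fun d i => PySem.Dict.modify d (PySem.List.pyGetD l i ' ') 0 (· + 1))]

lemma pv_count_heads (l : List Char) (c : Char) (h : l ≠ []) :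
    List.count c (pvHeads l) = pvNRuns l c := by
  obtain ⟨m, hm⟩ : ∃ m, l.length = m + 1 :=
    ⟨l.length - 1, by have := List.length_pos_iff.mpr h; omega⟩
  rw [pvHeads, pvNRuns, List.count_cons, List.count_eq_countP, List.countP_map,
    List.countP_filter, PySem.List.pyRange_one, List.countP_map, hm,
    List.range_succ_eq_map, List.countP_cons]
  have h1 : (((m+1 : Nat) : Int) - 1).toNat = m := by omega
  rw [h1, List.countP_map]
  have hcongr : ∀ k : Nat,
      ((fun a =>
            ((fun x => x == c) ∘ fun i => PySem.List.pyGetD l i ' ') a &&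
              decide (PySem.List.pyGetD l (a - 1) ' ' ≠ PySem.List.pyGetD l a ' ')) ∘
          fun k : Nat => (1:Int) + ↑k) k
      = (pvRS l c ∘ Nat.succ) k := by
    intro k
    have e1 : (1 : Int) + (k : Int) = ((k+1 : Nat) : Int) := by push_cast; ring
    have e2 : ((k+1 : Nat) : Int) - 1 = ((k : Nat) : Int) := by push_cast; ring
    simp only [Function.comp, e1, e2]
    simp only [PySem.List.pyGetD_natCast, pvRS, Nat.succ_eq_add_one, Nat.add_sub_cancel]
    by_cases hc : l.getD (k+1) ' ' = c
    · by_cases hp : l.getD k ' ' = c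
      · rw [hc, hp]; simp
      · rw [hc]; simp
    · have hc' : l[k+1]?.getD ' ' ≠ c := by simpa [List.getD] using hc
      simp [List.getD, hc']
  rw [List.countP_congr (fun x _ => by rw [hcongr x])]  -- align both countP
  have h0 : pvRS l c 0 = (PySem.List.pyGetD l 0 ' ' == c) := by
    rw [pvRS, PySem.List.pyGetD_ofNat']
    by_cases hc : l.getD 0 ' ' = c
    · rw [hc]; simp
    · simp [List.getD] at hc
      simp [List.getD, hc]
  rw [h0]

lemma pv_fi_spec (l : List Char) (c : Char) (h : c ∈ l) :
    pvFi l c < l.length ∧ l.getD (pvFi l c) ' ' = c ∧ ∀ j, j < pvFi l c → l.getD j ' ' ≠ c := by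
  obtain ⟨i, hi⟩ := Option.isSome_iff_exists.mp (List.isSome_idxOf?.mpr h)
  obtain ⟨hlt, hget, hmin⟩ := List.idxOf?_eq_some_iff.mp hi
  have hfi : pvFi l c = i := by simp [pvFi, hi]
  refine ⟨by omega, ?_, ?_⟩
  · rw [hfi, List.getD_eq_getElem l ' ' hlt]; exact hget
  · intro j hj
    rw [hfi] at hj
    rw [List.getD_eq_getElem l ' ' (by omega)]
    exact hmin j hj

lemma pv_nruns_pos (l : List Char) (c : Char) : 0 < pvNRuns l c ↔ c ∈ l := by
  rw [pvNRuns, List.countP_pos_iff]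
  constructor
  · rintro ⟨a, ha, hr⟩
    rw [List.mem_range] at ha
    rw [pvRS] at hr
    simp only [decide_eq_true_eq] at hr
    rw [List.getD_eq_getElem l ' ' ha] at hr
    exact hr.1 ▸ List.getElem_mem ha
  · intro hc
    obtain ⟨hfin, hfic, hfimin⟩ := pv_fi_spec l c hc
    refine ⟨pvFi l c, List.mem_range.mpr hfin, ?_⟩
    rw [pvRS]
    simp only [decide_eq_true_eq]
    refine ⟨hfic, ?_⟩
    rcases Nat.eq_zero_or_pos (pvFi l c) with h0 | h0
    · exact Or.inl h0
    · exact Or.inr (hfimin (pvFi l c - 1) (by omega))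

lemma pv_mem_heads (l : List Char) (c : Char) (h : l ≠ []) :
    c ∈ pvHeads l ↔ c ∈ l := by
  rw [← List.count_pos_iff, pv_count_heads l c h, pv_nruns_pos]

lemma pv_li_spec (l : List Char) (c : Char) (h : c ∈ l) :
    pvLi l c < l.length ∧ l.getD (pvLi l c) ' ' = c ∧
      ∀ j, pvLi l c < j → j < l.length → l.getD j ' ' ≠ c := by
  have hr : c ∈ l.reverse := by simpa using h
  obtain ⟨i, hi⟩ := Option.isSome_iff_exists.mp (List.isSome_idxOf?.mpr hr)
  obtain ⟨hlt, hget, hmin⟩ := List.idxOf?_eq_some_iff.mp hi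
  have hn : i < l.length := by simpa using hlt
  have hli : pvLi l c = l.length - 1 - i := by simp [pvLi, hi]
  have hrevD : ∀ j, j < l.length → l.reverse.getD j ' ' = l.getD (l.length - 1 - j) ' ' := by
    intro j hj
    rw [List.getD_eq_getElem l.reverse ' ' (by simpa using hj),
      List.getD_eq_getElem l ' ' (by omega), List.getElem_reverse]
  have hgetD : l.reverse.getD i ' ' = c := by
    rw [List.getD_eq_getElem l.reverse ' ' hlt]; exact hget
  have hminD : ∀ j, j < i → l.reverse.getD j ' ' ≠ c := by
    intro j hj
    rw [List.getD_eq_getElem l.reverse ' ' (by omega)]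
    exact hmin j hj
  refine ⟨by omega, ?_, ?_⟩
  · rw [hli, ← hrevD i hn]; exact hgetD
  · intro j hj1 hj2
    rw [hli] at hj1
    have e : j = l.length - 1 - (l.length - 1 - j) := by omega
    rw [e, ← hrevD (l.length - 1 - j) (by omega)]
    exact hminD (l.length - 1 - j) (by omega)

lemma pv_find_start (l : List Char) (c : Char) (j k : Nat) (hk : k < l.length)
    (hkc : l.getD k ' ' = c) (hjk : j < k) (hj : l.getD j ' ' ≠ c) :
    ∃ i, j < i ∧ i ≤ k ∧ pvRS l c i = true := by
  induction k using Nat.strong_induction_on with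
  | h k ih =>
    by_cases hp : l.getD (k - 1) ' ' = c
    · have hk1 : j < k - 1 := by
        rcases Nat.lt_or_ge j (k-1) with h' | h'
        · exact h'
        · exfalso; have : j = k - 1 := by omega
          exact hj (this ▸ hp)
      obtain ⟨i, h1, h2, h3⟩ := ih (k-1) (by omega) (by omega) hp hk1
      exact ⟨i, h1, by omega, h3⟩
    · refine ⟨k, hjk, le_refl k, ?_⟩
      rw [pvRS]
      simp only [decide_eq_true_eq]
      exact ⟨hkc, Or.inr hp⟩

lemma pv_two_count (l : List Char) (c : Char) (i1 i2 : Nat) (h1 : i1 < l.length)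
    (h2 : i2 < l.length) (hne : i1 ≠ i2) (hr1 : pvRS l c i1 = true) (hr2 : pvRS l c i2 = true) :
    1 < pvNRuns l c := by
  rw [pvNRuns, List.countP_eq_length_filter]
  have hm1 : i1 ∈ (List.range l.length).filter (pvRS l c) := by
    simp [List.mem_filter, List.mem_range, h1, hr1]
  have hm2 : i2 ∈ (List.range l.length).filter (pvRS l c) := by
    simp [List.mem_filter, List.mem_range, h2, hr2]
  rcases hL : (List.range l.length).filter (pvRS l c) with _ | ⟨a, _ | ⟨b, t⟩⟩
  · rw [hL] at hm1; simp at hm1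
  · rw [hL] at hm1 hm2
    simp at hm1 hm2
    exact absurd (hm1.trans hm2.symm) hne
  · simp

lemma pv_core (l : List Char) (c : Char) (h : c ∈ l) :
    1 < pvNRuns l c ↔ ∃ m : Nat, pvFi l c ≤ m ∧ m < pvLi l c ∧ l.getD m ' ' ≠ c := by
  obtain ⟨hfin, hfic, hfimin⟩ := pv_fi_spec l c h
  obtain ⟨hlin, hlic, hlimax⟩ := pv_li_spec l c h
  constructor
  · intro h2
    have hlen : 1 < ((List.range l.length).filter (pvRS l c)).length := by
      rw [pvNRuns, List.countP_eq_length_filter] at h2; exact h2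
    set L := (List.range l.length).filter (pvRS l c) with hL
    have hpw : L.Pairwise (· < ·) := List.Pairwise.filter _ List.pairwise_lt_range
    have hab : L[0]'(by omega) < L[1]'(by omega) :=
      List.pairwise_iff_getElem.mp hpw 0 1 (by omega) (by omega) (by omega)
    have hmemL : ∀ x ∈ L, x < l.length ∧ pvRS l c x = true := by
      intro x hx
      rw [hL, List.mem_filter, List.mem_range] at hx
      exact hx
    obtain ⟨ha, hra⟩ := hmemL _ (List.getElem_mem (l := L) (n := 0) (by omega))
    obtain ⟨hb, hrb⟩ := hmemL _ (List.getElem_mem (l := L) (n := 1) (by omega))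
    rw [pvRS] at hra hrb
    simp only [decide_eq_true_eq] at hra hrb
    set a := L[0]'(by omega)
    set b := L[1]'(by omega)
    have hb1 : l.getD (b - 1) ' ' ≠ c := by
      rcases hrb.2 with h0 | h0
      · omega
      · exact h0
    have hfa : pvFi l c ≤ a := by
      by_contra hc
      exact hfimin a (by omega) hra.1
    have hbli : b ≤ pvLi l c := by
      by_contra hc
      exact hlimax b (by omega) hb hrb.1
    exact ⟨b - 1, by omega, by omega, hb1⟩
  · rintro ⟨m, hm1, hm2, hm3⟩
    obtain ⟨i2, hi21, hi22, hi23⟩ := pv_find_start l c m (pvLi l c) hlin hlic hm2 hm3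
    have hr1 : pvRS l c (pvFi l c) = true := by
      rw [pvRS]; simp only [decide_eq_true_eq]
      refine ⟨hfic, ?_⟩
      rcases Nat.eq_zero_or_pos (pvFi l c) with h0 | h0
      · exact Or.inl h0
      · exact Or.inr (hfimin (pvFi l c - 1) (by omega))
    exact pv_two_count l c (pvFi l c) i2 hfin (by omega) (by omega) hr1 hi23

lemma pv_condB (l : List Char) (c : Char) (h : c ∈ l) :
    ((PySem.List.pyRange (((PySem.List.index? l c).getD 0 : Nat) : Int)
        ((l.length : Int) - 1 -
          ((PySem.List.index? ((PySem.List.slice? l none none (-1)).getD []) c).getD 0 : Nat))).any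
      (fun k => decide (PySem.List.pyGetD l k ' ' ≠ c))) = true ↔
    ∃ m : Nat, pvFi l c ≤ m ∧ m < pvLi l c ∧ l.getD m ' ' ≠ c := by
  have hr : c ∈ l.reverse := by simpa using h
  obtain ⟨i, hi⟩ := Option.isSome_iff_exists.mp (List.isSome_idxOf?.mpr hr)
  obtain ⟨hlt, -, -⟩ := List.idxOf?_eq_some_iff.mp hi
  have hin : i < l.length := by simpa using hlt
  have hidx : ((PySem.List.index? l c).getD 0 : Nat) = pvFi l c := by
    rw [PySem.List.index?_eq_idxOf?, pvFi]
  have hj : (l.length : Int) - 1 -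
      (((PySem.List.index? ((PySem.List.slice? l none none (-1)).getD []) c).getD 0 : Nat) : Int)
      = ((pvLi l c : Nat) : Int) := by
    rw [PySem.List.slice?_none_none_neg_one]
    simp only [Option.getD_some]
    rw [PySem.List.index?_eq_idxOf?, hi, pvLi, hi]
    simp only [Option.getD_some]
    omega
  rw [hidx, hj, List.any_eq_true]
  constructor
  · rintro ⟨k, hk, hd⟩
    rw [PySem.List.mem_pyRange_one] at hk
    refine ⟨k.toNat, by omega, by omega, ?_⟩
    have e : k = ((k.toNat : Nat) : Int) := by omega
    rw [e, PySem.List.pyGetD_natCast] at hd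
    simpa using hd
  · rintro ⟨m, h1, h2, h3⟩
    refine ⟨(m : Int), PySem.List.mem_pyRange_one.mpr ⟨by omega, by omega⟩, ?_⟩
    rw [PySem.List.pyGetD_natCast]
    simpa using h3

lemma pv_main (s : String) (h : s.toList ≠ []) : solution s = solution_alt s := by
  rw [solution, solution_alt]
  simp only [pv_dictA, PySem.Dict.items_counter, List.filter_map, List.map_map]
  have hA : List.map (Prod.fst ∘ fun k => (k, (List.count k (pvHeads s.toList) : Int)))
        (List.filter ((fun p => decide (p.2 > 1)) ∘ fun k => (k, (List.count k (pvHeads s.toList) : Int)))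
          (PySem.Set.ofList (pvHeads s.toList)))
      = (PySem.Set.ofList (pvHeads s.toList)).filter (fun k => decide (1 < pvNRuns s.toList k)) := by
    rw [List.filter_congr (q := fun k => decide (1 < pvNRuns s.toList k))
      (fun x _ => by simp [Function.comp, pv_count_heads s.toList x h])]
    rw [List.map_congr_left (fun x _ => rfl)]
    exact List.map_id _
  rw [hA]
  set l := s.toList with hl
  set ansA := List.filter (fun k => decide (1 < pvNRuns l k)) (PySem.Set.ofList (pvHeads l)) with hansA
  set lonely := List.filter
      (fun c =>
        (PySem.List.pyRange (((PySem.List.index? l c).getD 0 : Nat) : Int)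
            ((l.length : Int) - 1 -
              ((PySem.List.index? ((PySem.List.slice? l none none (-1)).getD []) c).getD 0 : Nat))).any
          (fun k => decide (PySem.List.pyGetD l k ' ' ≠ c)))
      (PySem.List.sorted (PySem.Set.ofList l) (fun x => x)) with hlon
  have hnodA : ansA.Nodup := (PySem.Set.nodup_ofList (pvHeads l)).filter _
  have hnod1 : (PySem.List.sorted ansA (fun x => x)).Nodup :=
    (PySem.List.sorted_perm ansA (fun x => x) false).nodup_iff.mpr hnodA
  have hnodB : lonely.Nodup :=
    ((PySem.List.sorted_perm (PySem.Set.ofList l) (fun x => x) false).nodup_iff.mpr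
      (PySem.Set.nodup_ofList l)).filter _
  have hmem : ∀ x, x ∈ PySem.List.sorted ansA (fun x => x) ↔ x ∈ lonely := by
    intro x
    rw [PySem.List.mem_sorted, hansA, List.mem_filter, hlon, List.mem_filter,
      PySem.List.mem_sorted, PySem.Set.mem_ofList, PySem.Set.mem_ofList]
    constructor
    · rintro ⟨hx, hd⟩
      have hxl : x ∈ l := (pv_mem_heads l x h).mp hx
      refine ⟨hxl, ?_⟩
      rw [pv_condB l x hxl]
      simp only [decide_eq_true_eq] at hd
      exact (pv_core l x hxl).mp hd
    · rintro ⟨hx, hd⟩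
      rw [pv_condB l x hx] at hd
      refine ⟨(pv_mem_heads l x h).mpr hx, ?_⟩
      simp only [decide_eq_true_eq]
      exact (pv_core l x hx).mpr hd
  have hperm : (PySem.List.sorted ansA (fun x => x)).Perm lonely :=
    (List.perm_ext_iff_of_nodup hnod1 hnodB).mpr hmem
  have hkey : PySem.List.sorted ansA (fun x => x) = lonely := by
    refine List.Perm.eq_of_pairwise (fun a b _ _ hab hba => le_antisymm hab hba) ?_ ?_ hperm
    · exact PySem.List.sorted_pairwise ansA (fun x => x)
    · exact List.Pairwise.filter _ (PySem.List.sorted_pairwise (PySem.Set.ofList l) (fun x => x))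
  have hlen : ansA.length = 0 ↔ lonely = [] := by
    rw [List.length_eq_zero_iff, ← PySem.List.sorted_eq_nil_iff ansA (fun x => x) false, hkey]
  split_ifs with h1 h2
  · rfl
  · exact absurd (hlen.mp h1) h2
  · exact absurd (hlen.mpr ‹lonely = []›) h1
  · rw [hkey]

-- ===== VERDICT (by name: the statement is the Claim_ definition above) =====
theorem solution_spec : Claim_equal_solution := by
  intro s _ hpre
  unfold Spec_solution
  exact pv_main s (by simpa using hpre)
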